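-- pv_equiv track=rewrite | github.com/rehakomoon/vconf_editor | api/app/latex/text_utils.py | escape_underscores
-- ===== SOURCE A (Python) =====
-- def escape_underscores(text):
--     result = []
--     i = 0
--     while i < len(text):
--         c = text[i]
--         if c == '_':
--             # アンダースコアの前に連続するバックスラッシュを数える
--             num_backslashes = 0
--             j = i - 1
--             while j >= 0 and text[j] == '\\':
--                 num_backslashes += 1
--                 j -= 1
--             if num_backslashes % 2 == 0:
--                 # 偶数のバックスラッシュは、アンダースコアがエスケープされていないことを意味する
--                 result.append('\\_')
--             else:
--                 # 奇数の場合は、アンダースコアがエスケープ済みであることを意味する。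
--                 result.append('_')
--         else:
--             result.append(c)
--         i += 1
--     return ''.join(result)
-- ===== SOURCE B (Python) =====
-- def escape_underscores(text):
--     result = []
--     run = 0  # consecutive backslashes immediately before current char
--     for c in text:
--         if c == '_':
--             result.append('_' if run % 2 else '\\_')
--             run = 0
--         else:
--             result.append(c)
--             run = run + 1 if c == '\\' else 0
--     return ''.join(result)
-- ===== Notes on version B (the rewrite author's own statement) =====
-- stated objective: faster
-- what changed: Replaces the per-underscore backward rescan of preceding backslashes with a single forward pass that maintains a running count of consecutive backslashes.
import Mathlib
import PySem

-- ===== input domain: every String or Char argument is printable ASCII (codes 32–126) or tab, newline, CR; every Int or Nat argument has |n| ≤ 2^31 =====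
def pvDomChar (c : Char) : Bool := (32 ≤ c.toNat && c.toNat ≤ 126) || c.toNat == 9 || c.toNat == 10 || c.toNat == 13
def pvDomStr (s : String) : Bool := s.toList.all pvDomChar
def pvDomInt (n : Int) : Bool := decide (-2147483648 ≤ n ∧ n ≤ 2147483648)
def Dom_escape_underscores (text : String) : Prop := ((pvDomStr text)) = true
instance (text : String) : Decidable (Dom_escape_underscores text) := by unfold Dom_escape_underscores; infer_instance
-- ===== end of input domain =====

-- B replaces A's backward rescan of backslashes before each underscore by a single
-- forward pass with a running backslash count (objective: faster, O(n) vs O(n^2)).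

-- ===== PORT A =====
-- 'done' is the already-scanned prefix in reverse order (text[i-1], text[i-2], …),
-- so A's inner backward scan 'j = i-1; while text[j] == '\\'' is counting the
-- leading backslashes of 'done'.
def escCountBS (done : List Char) : Nat :=
  match done with
  | [] => 0
  | c :: rest => if c = '\\' then escCountBS rest + 1 else 0

def escGoA (done rest : List Char) : List Char :=
  match rest with
  | [] => []
  | c :: rs =>
    (if c = '_' then
      (if escCountBS done % 2 = 0 then ['\\', '_'] else ['_'])
     else [c]) ++ escGoA (c :: done) rs

def escape_underscores (text : String) : String :=
  String.mk (escGoA [] text.toList)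

-- ===== PORT B =====
def escGoB (run : Nat) (rest : List Char) : List Char :=
  match rest with
  | [] => []
  | c :: rs =>
    if c = '_' then
      (if run % 2 = 0 then ['\\', '_'] else ['_']) ++ escGoB 0 rs
    else
      c :: escGoB (if c = '\\' then run + 1 else 0) rs

def escape_underscores_alt (text : String) : String :=
  String.mk (escGoB 0 text.toList)

-- ===== PRECONDITION & SPEC =====
def Spec_escape_underscores (text : String) (out : String) : Prop := out = escape_underscores_alt text
instance (text : String) (out : String) : Decidable (Spec_escape_underscores text out) := by unfold Spec_escape_underscores; infer_instance

-- ===== CLAIM (what is proved, stated in full; the proofs are below) =====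
def Claim_equal_escape_underscores : Prop := ∀ (text : String), Dom_escape_underscores text → Spec_escape_underscores text (escape_underscores text)

-- ===== LEMMAS AND PROOFS =====
theorem escGoA_eq_goB (rest : List Char) : ∀ done, escGoA done rest = escGoB (escCountBS done) rest := by
  induction rest with
  | nil => intro done; rfl
  | cons c rs ih =>
    intro done
    by_cases hc : c = '_'
    · subst hc
      simp [escGoA, escGoB, ih, escCountBS]
    · simp [escGoA, escGoB, hc, ih ( c :: done), escCountBS]

-- ===== VERDICT (by name: the statement is the Claim_ definition above) =====
theorem escape_underscores_spec : Claim_equal_escape_underscores := by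
  intro text _
  unfold Spec_escape_underscores escape_underscores escape_underscores_alt
  rw [escGoA_eq_goB]
  rfl
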